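-- pv_equiv track=rewrite | github.com/MiffyLiye/ProjectEuler | Project Euler/12/12L.py | count
-- ===== SOURCE A (Python) =====
-- def div(n):
--     k=[]
--     for i in range(1,n+1):
--         if n%i==0:
--             k.append(i)
--     return k
--
-- def count(n):
--     if n%2==0:
--         p=div(int(n/2))
--         q=div(n+1)
--     else:
--         p=div(n)
--         q=div(int((n+1)/2))
--     r=[]
--     for i in p:
--         for j in q:
--             r.append(i*j)
--     r.sort()
--     s=[]
--     s.append(r[0])
--     for i in range(1,len(r)):
--         if s[len(s)-1]<r[i]:
--             s.append(r[i])
--     s.pop()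
--     return len(s)
-- ===== SOURCE B (Python) =====
-- def _ndiv(x):
--     # number of divisors of x (0 for x < 1), by trial division up to sqrt(x)
--     c = 0
--     i = 1
--     while i * i <= x:
--         if x % i == 0:
--             c += 1 if i * i == x else 2
--         i += 1
--     return c
--
--
-- def count(n):
--     # triangular number n*(n+1)/2 splits into coprime factors a, b;
--     # d is multiplicative, and A's pipeline returns d(a)*d(b) - 1
--     if n % 2 == 0:
--         a, b = n // 2, n + 1
--     else:
--         a, b = n, (n + 1) // 2
--     return _ndiv(a) * _ndiv(b) - 1
-- ===== Notes on version B (the rewrite author's own statement) =====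
-- stated objective: faster
-- what changed: Instead of enumerating every divisor of both coprime factors by scanning 1..x, forming all pairwise products, sorting and deduplicating them, B counts the divisors of each factor by trial division up to its square root and returns d(a)*d(b)-1.
-- outside the precondition, e.g. on count(0): A raises IndexError, B returns -1
import Mathlib
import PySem

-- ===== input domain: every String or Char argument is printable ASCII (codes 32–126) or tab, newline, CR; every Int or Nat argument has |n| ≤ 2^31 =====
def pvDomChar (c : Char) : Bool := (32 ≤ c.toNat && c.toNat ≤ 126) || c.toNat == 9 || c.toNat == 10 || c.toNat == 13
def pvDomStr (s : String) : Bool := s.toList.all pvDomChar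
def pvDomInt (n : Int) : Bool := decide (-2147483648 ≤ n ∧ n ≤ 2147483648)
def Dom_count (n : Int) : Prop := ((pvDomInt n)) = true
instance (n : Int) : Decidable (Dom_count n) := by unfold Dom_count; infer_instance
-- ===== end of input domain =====

-- B counts divisors of the two coprime factors of the triangular number by trial division
-- to the square root instead of A's full divisor scans + cross products + sort + dedup (faster).

-- ===== PORT A =====
-- div(n): collect 1 ≤ i ≤ n with n % i == 0
def divA (n : Int) : List Int :=
  (PySem.List.pyRange 1 (n + 1) 1).foldl
    (fun k i => if PySem.Int.mod n i == 0 then k ++ [i] else k) []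

-- the part of count after p, q are chosen: cross products, sort, dedup scan, pop, len.
-- r[0] is an IndexError when r = [] (only for n ≤ 0, excluded by Pre_count); pyGetD/none branch covers it.
-- the dedup scan: s = [r[0]]; for i in range(1, len(r)): if s[len(s)-1] < r[i]: s.append(r[i])
def dedupScan (rs : List Int) : List Int :=
  (PySem.List.pyRange 1 (rs.length : Int) 1).foldl
    (fun s i =>
      if PySem.List.pyGetD s ((s.length : Int) - 1) 0 < PySem.List.pyGetD rs i 0 then
        s ++ [PySem.List.pyGetD rs i 0]
      else s)
    [PySem.List.pyGetD rs 0 0]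

def countRest (p q : List Int) : List Int :=
  dedupScan (PySem.List.sorted
    (p.foldl (fun r i => q.foldl (fun r j => r ++ [i * j]) r) []) (fun x => x) false)

-- int(n/2) / int((n+1)/2): Python truncates the exact float; on the branch used it equals
-- floor division for every n admitted by Pre_count (n ≥ 1), ported as floordiv.
-- s.pop(); return len(s)  (pop? = none is the empty list, unreachable under Pre_count)
def popLen (s : List Int) : Int :=
  match PySem.List.pop? s (-1) with
  | some res => (res.2.length : Int)
  | none => 0

def count (n : Int) : Int :=
  if PySem.Int.mod n 2 == 0 then
    popLen (countRest (divA (PySem.Int.floordiv n 2)) (divA (n + 1)))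
  else
    popLen (countRest (divA n) (divA (PySem.Int.floordiv (n + 1) 2)))

-- ===== PORT B =====
-- _ndiv(x): while i*i <= x: if x % i == 0: c += 1 if i*i == x else 2
def ndivAux (x i c : Int) : Int :=
  if i * i ≤ x then
    ndivAux x (i + 1)
      (if PySem.Int.mod x i == 0 then c + (if i * i == x then 1 else 2) else c)
  else c
termination_by (x - i + 1).toNat
decreasing_by
  rename_i h
  have hix : i ≤ x := by nlinarith [mul_self_nonneg (i - 1), mul_self_nonneg i]
  omega

def ndiv (x : Int) : Int := ndivAux x 1 0

def count_alt (n : Int) : Int :=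
  if PySem.Int.mod n 2 == 0 then
    ndiv (PySem.Int.floordiv n 2) * ndiv (n + 1) - 1
  else
    ndiv n * ndiv (PySem.Int.floordiv (n + 1) 2) - 1

-- ===== PRECONDITION & SPEC =====
-- Pre_count excludes n ≤ 0: there div() yields an empty list and A raises IndexError at r[0].
def Pre_count (n : Int) : Prop := 1 ≤ n
instance (n : Int) : Decidable (Pre_count n) := by unfold Pre_count; infer_instance

def pvWitness_count : Int := 6

def Spec_count (n : Int) (out : Int) : Prop := out = count_alt n
instance (n : Int) (out : Int) : Decidable (Spec_count n out) := by unfold Spec_count; infer_instance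

-- ===== CLAIM (what is proved, stated in full; the proofs are below) =====
def Claim_equal_count : Prop := ∀ (n : Int), Dom_count n → Pre_count n → Spec_count n (count n)

-- ===== LEMMAS AND PROOFS =====

-- ---------- B side: ndiv counts divisors ----------

-- weight contributed by candidate j in B's sqrt loop
def wgt (m j : Nat) : Int := if m % j = 0 then (if j * j = m then 1 else 2) else 0

theorem ndivAux_sum (m : Nat) :
    ∀ (k i : Nat) (c : Int), 1 ≤ i → Nat.sqrt m + 1 - i = k →
      ndivAux (m : Int) (i : Int) c = c + ∑ j ∈ Finset.Ico i (Nat.sqrt m + 1), wgt m j := by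
  intro k
  induction k with
  | zero =>
    intro i c hi hk
    have hmlt : m < i * i := Nat.sqrt_lt.mp (by omega)
    rw [ndivAux, if_neg (by exact_mod_cast Nat.not_le.mpr hmlt),
      Finset.Ico_eq_empty (by omega), Finset.sum_empty, add_zero]
  | succ k ih =>
    intro i c hi hk
    have hii : i * i ≤ m := Nat.le_sqrt.mp (by omega)
    rw [ndivAux, if_pos (by exact_mod_cast hii),
      show ((i : Int) + 1) = ((i + 1 : Nat) : Int) by push_cast; ring,
      ih (i + 1) _ (by omega) (by omega),
      Finset.sum_eq_sum_Ico_succ_bot (by omega : i < Nat.sqrt m + 1) (wgt m)]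
    have hacc : (if PySem.Int.mod (m : Int) (i : Int) == 0 then
        c + (if (i : Int) * (i : Int) == (m : Int) then 1 else 2) else c) = c + wgt m i := by
      rw [PySem.Int.mod_natCast]
      unfold wgt
      by_cases h0 : m % i = 0 <;> by_cases hsq : i * i = m <;>
        simp [h0, hsq, Int.natCast_dvd_natCast, Nat.dvd_iff_mod_eq_zero,
          show ((i : Int) * i = (m : Int)) ↔ i * i = m by exact_mod_cast Iff.rfl]
    rw [hacc]; ring

theorem sqrt_sum_divisors (m : Nat) (hm : 1 ≤ m) :
    ∑ j ∈ Finset.Ico 1 (Nat.sqrt m + 1), wgt m j = (m.divisors.card : Int) := by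
  classical
  set s := Nat.sqrt m with hs
  set Dlo := m.divisors.filter (fun j => j ≤ s) with hDlo
  set Dhi := m.divisors.filter (fun j => ¬ j ≤ s) with hDhi
  have hsplit : Dlo.card + Dhi.card = m.divisors.card :=
    Finset.card_filter_add_card_filter_not _
  -- the scanned range, restricted to divisors, is exactly Dlo
  have hflt : (Finset.Ico 1 (s + 1)).filter (fun j => m % j = 0) = Dlo := by
    ext j
    simp only [hDlo, Finset.mem_filter, Nat.mem_divisors, Finset.mem_Ico]
    constructor
    · rintro ⟨⟨hj1, hjs⟩, hmod⟩
      exact ⟨⟨Nat.dvd_of_mod_eq_zero hmod, by omega⟩, by omega⟩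
    · rintro ⟨⟨hd, _⟩, hjs⟩
      have hj1 : 1 ≤ j := Nat.pos_of_dvd_of_pos hd (by omega)
      exact ⟨⟨hj1, by omega⟩, Nat.dvd_iff_mod_eq_zero.mp hd⟩
  have h1 : ∑ j ∈ Finset.Ico 1 (s + 1), wgt m j
      = ∑ j ∈ Dlo, (if j * j = m then (1 : Int) else 2) := by
    rw [← hflt, Finset.sum_filter]
    apply Finset.sum_congr rfl
    intro j _
    unfold wgt
    by_cases h0 : m % j = 0 <;> simp [h0]
  -- pairing d ↦ m / d between non-square low divisors and high divisors
  have key : (Dlo.filter (fun j => ¬ j * j = m)).card = Dhi.card := by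
    apply Finset.card_nbij' (fun j => m / j) (fun j => m / j)
    · intro j hj
      simp only [Finset.coe_filter, Set.mem_setOf_eq, hDlo, hDhi, Finset.mem_filter,
        Nat.mem_divisors] at hj ⊢
      obtain ⟨⟨⟨hdvd, hne⟩, hjs⟩, hnsq⟩ := hj
      have hj1 : 0 < j := Nat.pos_of_dvd_of_pos hdvd (by omega)
      refine ⟨⟨Nat.div_dvd_of_dvd hdvd, hne⟩, ?_⟩
      intro hle
      have hmj : j * (m / j) = m := Nat.mul_div_cancel' hdvd
      have hss : s * s ≤ m := Nat.sqrt_le m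
      have hms : m ≤ s * s := by calc m = j * (m / j) := hmj.symm
                                    _ ≤ s * s := Nat.mul_le_mul hjs hle
      have hspos : 0 < s := Nat.sqrt_pos.mpr (by omega)
      have hmss : m = s * s := le_antisymm hms hss
      have hjs' : s ≤ j := by nlinarith [Nat.mul_le_mul (le_refl j) hle]
      have hj : j = s := le_antisymm hjs hjs'
      exact hnsq (by rw [hj, ← hmss])
    · intro k hk
      simp only [Finset.coe_filter, Set.mem_setOf_eq, hDlo, hDhi, Finset.mem_filter,
        Nat.mem_divisors] at hk ⊢
      obtain ⟨⟨hdvd, hne⟩, hks⟩ := hk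
      have hk1 : 0 < k := Nat.pos_of_dvd_of_pos hdvd (by omega)
      have hmk : k * (m / k) = m := Nat.mul_div_cancel' hdvd
      have hlo : m / k ≤ s := by
        by_contra hgt
        have h1 : s + 1 ≤ k := by omega
        have h2 : s + 1 ≤ m / k := by omega
        have := Nat.lt_succ_sqrt m
        nlinarith
      refine ⟨⟨⟨Nat.div_dvd_of_dvd hdvd, hne⟩, hlo⟩, ?_⟩
      intro hsq
      have hpos : 0 < m / k := Nat.div_pos (Nat.le_of_dvd (by omega) hdvd) hk1
      have hkk : k = m / k :=
        Nat.eq_of_mul_eq_mul_right hpos (hmk.trans hsq.symm)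
      omega
    · intro j hj
      simp only [Finset.coe_filter, Set.mem_setOf_eq, hDlo, Finset.mem_filter,
        Nat.mem_divisors] at hj
      exact Nat.div_div_self hj.1.1.1 (by omega)
    · intro k hk
      simp only [Finset.coe_filter, Set.mem_setOf_eq, hDhi,
        Nat.mem_divisors] at hk
      exact Nat.div_div_self hk.1.1 (by omega)
  have hE : (Dlo.filter (fun j => j * j = m)).card
      + (Dlo.filter (fun j => ¬ j * j = m)).card = Dlo.card :=
    Finset.card_filter_add_card_filter_not _
  have h2 : ∑ j ∈ Dlo, (if j * j = m then (1 : Int) else 2)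
      = ((Dlo.filter (fun j => j * j = m)).card : Int)
        + 2 * ((Dlo.filter (fun j => ¬ j * j = m)).card : Int) := by
    rw [← Finset.sum_filter_add_sum_filter_not Dlo (fun j => j * j = m)]
    rw [Finset.sum_congr rfl (fun j hj => if_pos (Finset.mem_filter.mp hj).2),
      Finset.sum_congr rfl (fun j hj => if_neg (Finset.mem_filter.mp hj).2)]
    simp [mul_comm]
  rw [h1, h2]
  push_cast [← hsplit, ← hE, ← key]
  ring

theorem ndiv_eq (m : Nat) (hm : 1 ≤ m) : ndiv (m : Int) = (m.divisors.card : Int) := by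
  unfold ndiv
  rw [show (1 : Int) = ((1 : Nat) : Int) from rfl,
    ndivAux_sum m (Nat.sqrt m + 1 - 1) 1 0 le_rfl rfl, zero_add]
  exact sqrt_sum_divisors m hm

-- ---------- A side: divA ----------

theorem divA_eq (n : Int) :
    divA n = (PySem.List.pyRange 1 (n + 1) 1).filter (fun i => PySem.Int.mod n i == 0) := by
  unfold divA
  exact (PySem.List.foldl_append_if_eq_filter
    (fun i => PySem.Int.mod n i == 0) (PySem.List.pyRange 1 (n + 1) 1) []).trans
    (List.nil_append _)


theorem pairwise_divA (n : Int) : (divA n).Pairwise (· < ·) := by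
  rw [divA_eq]
  exact (PySem.List.pairwise_lt_pyRange_one 1 (n + 1)).filter _


theorem mem_divA (m : Nat) (hm : 1 ≤ m) (x : Int) :
    x ∈ divA (m : Int) ↔ 1 ≤ x ∧ x ∣ (m : Int) := by
  rw [divA_eq]
  simp only [List.mem_filter, PySem.List.mem_pyRange_one, beq_iff_eq,
    PySem.Int.mod_eq_zero_iff_dvd]
  constructor
  · rintro ⟨⟨h1, _⟩, hd⟩; exact ⟨h1, hd⟩
  · rintro ⟨h1, hd⟩
    refine ⟨⟨h1, ?_⟩, hd⟩
    have hm : (0 : Int) < (m : Int) := by exact_mod_cast hm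
    have := Int.le_of_dvd hm hd
    omega


theorem nodup_divA (n : Int) : (divA n).Nodup := by
  exact (pairwise_divA n).imp ne_of_lt


theorem length_divA (m : Nat) (hm : 1 ≤ m) : (divA (m : Int)).length = m.divisors.card := by
  have nd := nodup_divA (m : Int)
  have hset : (divA (m : Int)).toFinset = m.divisors.image (fun d : Nat => (d : Int)) := by
    ext x
    simp only [List.mem_toFinset, Finset.mem_image, Nat.mem_divisors, mem_divA m hm]
    constructor
    · rintro ⟨h1, hd⟩
      refine ⟨x.toNat, ⟨?_, by omega⟩, by omega⟩
      rw [← Int.natCast_dvd_natCast, Int.toNat_of_nonneg (by omega)]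
      exact hd
    · rintro ⟨d, ⟨hd, hm0⟩, rfl⟩
      have hd1 : 0 < d := Nat.pos_of_dvd_of_pos hd (by omega)
      exact ⟨by exact_mod_cast hd1, by exact_mod_cast hd⟩
  rw [← List.toFinset_card_of_nodup nd, hset,
    Finset.card_image_of_injective _ Nat.cast_injective]

-- ---------- cross product ----------

theorem cross_eq (p q : List Int) :
    p.foldl (fun r i => q.foldl (fun r j => r ++ [i * j]) r) []
      = p.flatMap (fun i => q.map (i * ·)) := by
  have h : ∀ (acc : List Int) (i : Int),
      List.foldl (fun r j => r ++ [i * j]) acc q = acc ++ q.map (i * ·) := by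
    intro acc i
    exact PySem.List.foldl_append_singleton_eq_map (i * ·) q acc
  calc p.foldl (fun r i => q.foldl (fun r j => r ++ [i * j]) r) []
      = p.foldl (fun r i => r ++ q.map (i * ·)) [] := by
        exact PySem.List.foldl_congr_mem p _ _ [] (fun acc x _ => h acc x)
    _ = p.flatMap (fun i => q.map (i * ·)) := by
        simpa using PySem.List.foldl_append_eq_flatMap (fun i => q.map (i * ·)) p []


theorem length_cross (p q : List Int) :
    (p.flatMap (fun i => q.map (i * ·))).length = p.length * q.length := by
  induction p with
  | nil => simp
  | cons x xs ih => simp [List.flatMap_cons, ih]; ring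


theorem prod_inj {a b : Nat} (hab : Nat.Coprime a b) {i1 i2 j1 j2 : Int}
    (h1 : 1 ≤ i1) (d1 : i1 ∣ (a : Int)) (h2 : 1 ≤ i2) (d2 : i2 ∣ (a : Int))
    (g1 : 1 ≤ j1) (e1 : j1 ∣ (b : Int)) (g2 : 1 ≤ j2) (e2 : j2 ∣ (b : Int))
    (h : i1 * j1 = i2 * j2) : i1 = i2 := by
  -- move to Nat and use coprimality
  set c1 := i1.toNat; set c2 := i2.toNat; set e1' := j1.toNat; set e2' := j2.toNat
  have hi1 : (c1 : Int) = i1 := Int.toNat_of_nonneg (by omega)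
  have hi2 : (c2 : Int) = i2 := Int.toNat_of_nonneg (by omega)
  have hj1 : (e1' : Int) = j1 := Int.toNat_of_nonneg (by omega)
  have hj2 : (e2' : Int) = j2 := Int.toNat_of_nonneg (by omega)
  have dc1 : c1 ∣ a := by rw [← Int.natCast_dvd_natCast]; rw [hi1]; exact d1
  have dc2 : c2 ∣ a := by rw [← Int.natCast_dvd_natCast]; rw [hi2]; exact d2
  have de1 : e1' ∣ b := by rw [← Int.natCast_dvd_natCast]; rw [hj1]; exact e1
  have de2 : e2' ∣ b := by rw [← Int.natCast_dvd_natCast]; rw [hj2]; exact e2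
  have hmul : c1 * e1' = c2 * e2' := by
    have : ((c1 * e1' : Nat) : Int) = ((c2 * e2' : Nat) : Int) := by
      push_cast; rw [hi1, hi2, hj1, hj2]; exact h
    exact_mod_cast this
  have cop1 : Nat.Coprime c1 e2' :=
    Nat.Coprime.coprime_dvd_right de2 (Nat.Coprime.coprime_dvd_left dc1 hab)
  have cop2 : Nat.Coprime c2 e1' :=
    Nat.Coprime.coprime_dvd_right de1 (Nat.Coprime.coprime_dvd_left dc2 hab)
  have d12 : c1 ∣ c2 := cop1.dvd_of_dvd_mul_right (hmul ▸ Dvd.intro _ rfl)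
  have d21 : c2 ∣ c1 := cop2.dvd_of_dvd_mul_right (hmul ▸ Dvd.intro _ rfl)
  have : c1 = c2 := Nat.dvd_antisymm d12 d21
  rw [← hi1, ← hi2, this]


theorem nodup_cross {a b : Nat} (ha : 1 ≤ a) (hb : 1 ≤ b) (hab : Nat.Coprime a b) :
    ((divA (a : Int)).flatMap (fun i => (divA (b : Int)).map (i * ·))).Nodup := by
  rw [List.nodup_flatMap]
  constructor
  · intro i hi
    have h1 : 1 ≤ i := ((mem_divA a ha i).mp hi).1
    exact (nodup_divA _).map (fun x y hxy => by
      have : i ≠ 0 := by omega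
      exact mul_left_cancel₀ this hxy)
  · have hp := pairwise_divA (a : Int)
    refine List.Pairwise.imp_of_mem ?_ hp
    intro i1 i2 hi1 hi2 hlt
    intro z hz1 hz2
    simp only [List.mem_map] at hz1 hz2
    obtain ⟨j1, hj1, rfl⟩ := hz1
    obtain ⟨j2, hj2, hz⟩ := hz2
    have m1 := (mem_divA a ha i1).mp hi1
    have m2 := (mem_divA a ha i2).mp hi2
    have n1 := (mem_divA b hb j1).mp hj1
    have n2 := (mem_divA b hb j2).mp hj2
    have : i1 = i2 := prod_inj hab m1.1 m1.2 m2.1 m2.2 n1.1 n1.2 n2.1 n2.2 hz.symm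
    omega


-- ---------- dedup loop keeps a strictly increasing list ----------

theorem dedup_take (t : List Int) (ht : t.Pairwise (· < ·)) :
    ∀ (k : Nat), 1 ≤ k → k ≤ t.length →
      (PySem.List.pyRange 1 (k : Int) 1).foldl
        (fun s i =>
          if PySem.List.pyGetD s ((s.length : Int) - 1) 0 < PySem.List.pyGetD t i 0 then
            s ++ [PySem.List.pyGetD t i 0]
          else s)
        [PySem.List.pyGetD t 0 0] = t.take k := by
  intro k
  induction k with
  | zero => omega
  | succ k ih =>
    intro _ hlen
    by_cases hk : k = 0
    · subst hk
      obtain ⟨x, xs, rfl⟩ : ∃ x xs, t = x :: xs := by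
        cases t with
        | nil => simp at hlen
        | cons x xs => exact ⟨x, xs, rfl⟩
      rw [show ((1 : Nat) : Int) = 1 from rfl, PySem.List.pyRange_one_eq_nil le_rfl]
      simp [PySem.List.pyGetD_zero_cons]
    · have hk1 : 1 ≤ k := by omega
      have hkl : k ≤ t.length := by omega
      have hkk : k < t.length := by omega
      rw [show ((k + 1 : Nat) : Int) = (k : Int) + 1 by push_cast; ring,
        PySem.List.pyRange_one_succ_right (by exact_mod_cast hk1),
        List.foldl_append, ih hk1 hkl]
      simp only [List.foldl_cons, List.foldl_nil]
      have hlt : (t.take k).length = k := by simp [List.length_take]; omega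
      have hg1 : PySem.List.pyGetD (t.take k) (((t.take k).length : Int) - 1) 0
          = t[k - 1]'(by omega) := by
        rw [PySem.List.pyGetD_eq_getElem _ 0 (by omega) (by omega)]
        simp only [List.getElem_take]
        congr 1
        omega
      have hg2 : PySem.List.pyGetD t (k : Int) 0 = t[k]'hkk := by
        rw [PySem.List.pyGetD_eq_getElem _ 0 (by omega) (by exact_mod_cast hkk)]
        simp
      rw [hg1, hg2, if_pos (List.pairwise_iff_getElem.mp ht (k - 1) k (by omega) hkk (by omega))]
      rw [List.take_add_one, List.getElem?_eq_getElem hkk]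
      rfl

theorem dedup_loop (t : List Int) (ht : t.Pairwise (· < ·)) (hne : t ≠ []) :
    dedupScan t = t := by
  unfold dedupScan
  rw [dedup_take t ht t.length (List.length_pos_iff.mpr hne) le_rfl, List.take_length]

-- ---------- the pipeline on one coprime pair ----------

theorem countRest_eq {a b : Nat} (ha : 1 ≤ a) (hb : 1 ≤ b) (hab : Nat.Coprime a b) :
    ∃ l x, countRest (divA (a : Int)) (divA (b : Int)) = l ++ [x] ∧
      l.length + 1 = a.divisors.card * b.divisors.card := by
  unfold countRest
  rw [cross_eq]
  set t := PySem.List.sorted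
    ((divA (a : Int)).flatMap (fun i => (divA (b : Int)).map (i * ·))) (fun x => x) false with hts
  have hperm := PySem.List.sorted_perm
    ((divA (a : Int)).flatMap (fun i => (divA (b : Int)).map (i * ·))) (fun x => x) false
  have hnd : t.Nodup := hperm.nodup_iff.mpr (nodup_cross ha hb hab)
  have hle : t.Pairwise (· ≤ ·) := PySem.List.sorted_pairwise _ _
  have hlt : t.Pairwise (· < ·) := (hle.and hnd).imp (fun h => lt_of_le_of_ne h.1 h.2)
  have hlen : t.length = a.divisors.card * b.divisors.card := by
    rw [hperm.length_eq, length_cross, length_divA a ha, length_divA b hb]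
  have hca : 0 < a.divisors.card :=
    Finset.card_pos.mpr ⟨1, Nat.one_mem_divisors.mpr (by omega)⟩
  have hcb : 0 < b.divisors.card :=
    Finset.card_pos.mpr ⟨1, Nat.one_mem_divisors.mpr (by omega)⟩
  have hne : t ≠ [] := by
    intro h
    rw [h] at hlen
    simp at hlen
    rcases hlen with h' | h' <;> omega
  rcases List.eq_nil_or_concat t with h | ⟨l, x, hlx⟩
  · exact absurd h hne
  · rw [List.concat_eq_append] at hlx
    refine ⟨l, x, ?_, ?_⟩
    · rw [dedup_loop t hlt hne, hlx]
    · have := hlen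
      rw [hlx] at this
      simp at this
      omega

theorem branch_eq {a b : Nat} (ha : 1 ≤ a) (hb : 1 ≤ b) (hab : Nat.Coprime a b) :
    popLen (countRest (divA (a : Int)) (divA (b : Int)))
      = ndiv (a : Int) * ndiv (b : Int) - 1 := by
  obtain ⟨l, x, hcr, hlen⟩ := countRest_eq ha hb hab
  unfold popLen
  rw [hcr, PySem.List.pop?_last]
  simp only
  rw [ndiv_eq a ha, ndiv_eq b hb]
  have : (l.length : Int) + 1 = (a.divisors.card : Int) * (b.divisors.card : Int) := by
    exact_mod_cast hlen
  omega

-- ===== VERDICT (by name: the statement is the Claim_ definition above) =====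
theorem count_spec : Claim_equal_count := by
  intro n _ hpre
  unfold Spec_count
  have hpre' : 1 ≤ n := hpre
  obtain ⟨N, rfl⟩ : ∃ N : Nat, n = (N : Int) :=
    ⟨n.toNat, (Int.toNat_of_nonneg (by omega)).symm⟩
  have hN : 1 ≤ N := by exact_mod_cast hpre'
  have hcop : Nat.Coprime N (N + 1) := by simp
  unfold count count_alt
  rw [show ((2 : Int)) = ((2 : Nat) : Int) from rfl, PySem.Int.mod_natCast,
    PySem.Int.floordiv_natCast,
    show ((N : Int) + 1) = ((N + 1 : Nat) : Int) by push_cast; ring,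
    PySem.Int.floordiv_natCast]
  by_cases h2 : N % 2 = 0
  · rw [if_pos (by simp [h2]), if_pos (by simp [h2])]
    have hdvd : 2 ∣ N := Nat.dvd_of_mod_eq_zero h2
    exact branch_eq (by omega) (by omega)
      (Nat.Coprime.coprime_dvd_left (Nat.div_dvd_of_dvd hdvd) hcop)
  · rw [if_neg (by simp; omega), if_neg (by simp; omega)]
    have hdvd : 2 ∣ (N + 1) := Nat.dvd_of_mod_eq_zero (by omega)
    exact branch_eq (by omega) (by omega)
      (Nat.Coprime.coprime_dvd_right (Nat.div_dvd_of_dvd hdvd) hcop)
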